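-- pv_equiv track=rewrite | github.com/quarkaiporra/BananaForge | src/bananaforge/materials/gradient_processor.py | _classify_gradient_types
-- ===== SOURCE A (Python) =====
-- from typing import Dict, List, Optional, Tuple, Union
--
-- def _classify_gradient_types(regions: List[Dict]) -> Dict:
--     """Classify gradient regions by type."""
--     type_counts = {"linear": 0, "radial": 0, "diagonal": 0, "complex": 0}
--
--     for region in regions:
--         gradient_type = region["gradient_type"]
--         if gradient_type in type_counts:
--             type_counts[gradient_type] += 1
--         else:
--             type_counts["complex"] += 1
--
--     return type_counts
-- ===== SOURCE B (Python) =====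
-- def _classify_gradient_types(regions):
--     """Classify gradient regions by type."""
--     freq = {}
--     for region in regions:
--         gt = region["gradient_type"]
--         freq[gt] = freq.get(gt, 0) + 1
--     named = ("linear", "radial", "diagonal")
--     counts = {k: freq.get(k, 0) for k in named}
--     counts["complex"] = sum(v for k, v in freq.items() if k not in named)
--     return counts
-- ===== Notes on version B (the rewrite author's own statement) =====
-- stated objective: alternative
-- what changed: Builds a full frequency table of every distinct gradient_type in one pass, then assembles the result in a second pass: the three named keys are read off the table and 'complex' is the sum, over the table's distinct non-named keys (including the literal 'complex'), of their frequencies.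
import Mathlib
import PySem

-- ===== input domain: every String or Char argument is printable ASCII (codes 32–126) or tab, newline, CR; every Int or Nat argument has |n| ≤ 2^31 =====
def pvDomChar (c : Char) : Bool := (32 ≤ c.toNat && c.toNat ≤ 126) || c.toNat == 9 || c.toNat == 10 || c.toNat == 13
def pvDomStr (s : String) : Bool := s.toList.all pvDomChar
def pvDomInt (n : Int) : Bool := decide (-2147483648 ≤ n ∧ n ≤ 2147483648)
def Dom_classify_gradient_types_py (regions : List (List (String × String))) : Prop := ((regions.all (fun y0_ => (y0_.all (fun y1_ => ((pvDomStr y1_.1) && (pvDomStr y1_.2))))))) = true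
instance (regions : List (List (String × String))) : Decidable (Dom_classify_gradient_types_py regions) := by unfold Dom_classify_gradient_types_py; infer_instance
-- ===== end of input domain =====

-- B replaces A's per-region branch into a fixed 4-key dict by building a frequency table of every
-- distinct gradient type in one pass and assembling the result from the table in a second pass,
-- summing the non-named entries into "complex" (alternative decomposition, same O(n) cost).


-- ===== PORT A =====
-- the loop body: gradient_type = region["gradient_type"]; if it is a key of type_counts bump it,
-- else bump "complex" (none = KeyError, excluded by Pre_; the port then leaves the state unchanged)
def pyStepA (tc : PySem.Dict String Int) (region : List (String × String)) : PySem.Dict String Int :=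
  match (PySem.Dict.mk region).get? "gradient_type" with
  | some gt => if tc.contains gt then tc.modify gt 0 (· + 1) else tc.modify "complex" 0 (· + 1)
  | none => tc

def classify_gradient_types_py (regions : List (List (String × String))) : List (String × Int) :=
  (regions.foldl pyStepA
    (PySem.Dict.mk [("linear", 0), ("radial", 0), ("diagonal", 0), ("complex", 0)])).items

-- ===== PORT B =====
-- k in named, for named = ("linear", "radial", "diagonal")
def pvNamed (k : String) : Bool := k == "linear" || k == "radial" || k == "diagonal"

-- freq[gt] = freq.get(gt, 0) + 1  (none = KeyError on region["gradient_type"], excluded by Pre_)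
def pyStepB (freq : PySem.Dict String Int) (region : List (String × String)) : PySem.Dict String Int :=
  match (PySem.Dict.mk region).get? "gradient_type" with
  | some gt => freq.insert gt (freq.getD gt 0 + 1)
  | none => freq

def classify_gradient_types_py_alt (regions : List (List (String × String))) : List (String × Int) :=
  let freq := regions.foldl pyStepB PySem.Dict.empty
  [("linear", freq.getD "linear" 0), ("radial", freq.getD "radial" 0), ("diagonal", freq.getD "diagonal" 0),
   ("complex", ((freq.items.filter (fun p => !pvNamed p.1)).map (·.2)).sum)]

-- ===== PRECONDITION & SPEC =====
-- Pre_ excludes exactly the inputs where region["gradient_type"] raises KeyError (both A and B raise there).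
def Pre_classify_gradient_types_py (regions : List (List (String × String))) : Prop :=
  ∀ region ∈ regions, ((PySem.Dict.mk region).get? "gradient_type").isSome = true

instance (regions : List (List (String × String))) : Decidable (Pre_classify_gradient_types_py regions) := by
  unfold Pre_classify_gradient_types_py; infer_instance

def pvWitness_classify_gradient_types_py : (List (List (String × String))) :=
  [[("gradient_type", "linear")], [("gradient_type", "swirl")]]

def Spec_classify_gradient_types_py (regions : List (List (String × String))) (out : List (String × Int)) : Prop := out = classify_gradient_types_py_alt regions
instance (regions : List (List (String × String))) (out : List (String × Int)) : Decidable (Spec_classify_gradient_types_py regions out) := by unfold Spec_classify_gradient_types_py; infer_instance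

-- ===== CLAIM (what is proved, stated in full; the proofs are below) =====
def Claim_equal_classify_gradient_types_py : Prop := ∀ (regions : List (List (String × String))), Dom_classify_gradient_types_py regions → Pre_classify_gradient_types_py regions → Spec_classify_gradient_types_py regions (classify_gradient_types_py regions)

-- ===== LEMMAS AND PROOFS =====

-- the list of extracted gradient types ("" is unreachable under Pre_)
def pvGts (regions : List (List (String × String))) : List String :=
  regions.map (fun region => ((PySem.Dict.mk region).get? "gradient_type").getD "")

-- loop invariant for A: the fold from an arbitrary 4-entry state adds per-type counts of the
-- extracted gradient-type list, with "complex" collecting every non-named type.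
lemma pyStepA_loop (regions : List (List (String × String)))
    (h : ∀ region ∈ regions, ((PySem.Dict.mk region).get? "gradient_type").isSome = true)
    (a b c d : Int) :
    (regions.foldl pyStepA
      (PySem.Dict.mk [("linear", a), ("radial", b), ("diagonal", c), ("complex", d)])).items =
    [("linear", a + PySem.List.count (pvGts regions) "linear"),
     ("radial", b + PySem.List.count (pvGts regions) "radial"),
     ("diagonal", c + PySem.List.count (pvGts regions) "diagonal"),
     ("complex", d + ((pvGts regions).countP (fun g => !pvNamed g) : Int))] := by
  induction regions generalizing a b c d with
  | nil => simp [PySem.List.count, pvGts]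
  | cons r rs ih =>
    have hr := h r (List.mem_cons_self ..)
    obtain ⟨gt, hgt⟩ := Option.isSome_iff_exists.mp hr
    have hrs : ∀ region ∈ rs, ((PySem.Dict.mk region).get? "gradient_type").isSome = true :=
      fun region hm => h region (List.mem_cons_of_mem _ hm)
    simp only [List.foldl_cons, pvGts, List.map_cons]
    by_cases h1 : gt = "linear"
    · subst h1
      have hstep : pyStepA (PySem.Dict.mk [("linear", a), ("radial", b), ("diagonal", c), ("complex", d)]) r =
          PySem.Dict.mk [("linear", a + 1), ("radial", b), ("diagonal", c), ("complex", d)] := by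
        simp only [pyStepA, hgt]
        simp [PySem.Dict.modify, PySem.Dict.insert, PySem.Dict.getD,
          PySem.Dict.get?, PySem.Dict.contains]
      rw [hstep, ih hrs]
      simp [PySem.List.count_eq, pvGts, hgt, pvNamed]
      omega
    · by_cases h2 : gt = "radial"
      · subst h2
        have hstep : pyStepA (PySem.Dict.mk [("linear", a), ("radial", b), ("diagonal", c), ("complex", d)]) r =
            PySem.Dict.mk [("linear", a), ("radial", b + 1), ("diagonal", c), ("complex", d)] := by
          simp only [pyStepA, hgt]
          simp [PySem.Dict.modify, PySem.Dict.insert, PySem.Dict.getD,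
            PySem.Dict.get?, PySem.Dict.contains]
        rw [hstep, ih hrs]
        simp [PySem.List.count_eq, pvGts, hgt, pvNamed]
        omega
      · by_cases h3 : gt = "diagonal"
        · subst h3
          have hstep : pyStepA (PySem.Dict.mk [("linear", a), ("radial", b), ("diagonal", c), ("complex", d)]) r =
              PySem.Dict.mk [("linear", a), ("radial", b), ("diagonal", c + 1), ("complex", d)] := by
            simp only [pyStepA, hgt]
            simp [PySem.Dict.modify, PySem.Dict.insert, PySem.Dict.getD,
              PySem.Dict.get?, PySem.Dict.contains]
          rw [hstep, ih hrs]
          simp [PySem.List.count_eq, pvGts, hgt, pvNamed]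
          omega
        · -- gt is none of the three named types: both branches of A bump "complex"
          have hstep : pyStepA (PySem.Dict.mk [("linear", a), ("radial", b), ("diagonal", c), ("complex", d)]) r =
              PySem.Dict.mk [("linear", a), ("radial", b), ("diagonal", c), ("complex", d + 1)] := by
            by_cases h4 : gt = "complex"
            · subst h4
              simp only [pyStepA, hgt]
              simp [PySem.Dict.modify, PySem.Dict.insert, PySem.Dict.getD,
                PySem.Dict.get?, PySem.Dict.contains]
            · simp only [pyStepA, hgt]
              simp [PySem.Dict.modify, PySem.Dict.insert, PySem.Dict.getD,
                PySem.Dict.get?, PySem.Dict.contains, Ne.symm h1, Ne.symm h2, Ne.symm h3, Ne.symm h4]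
          rw [hstep, ih hrs]
          simp [PySem.List.count_eq, pvGts, hgt, pvNamed, h1, h2, h3]
          omega

-- B's first pass builds exactly Counter(gts)
lemma pyStepB_counter (regions : List (List (String × String)))
    (h : ∀ region ∈ regions, ((PySem.Dict.mk region).get? "gradient_type").isSome = true) :
    regions.foldl pyStepB PySem.Dict.empty = PySem.Dict.counter (pvGts regions) := by
  have hcongr : regions.foldl pyStepB PySem.Dict.empty =
      regions.foldl (fun freq region =>
        let gt := ((PySem.Dict.mk region).get? "gradient_type").getD ""
        freq.insert gt (freq.getD gt 0 + 1)) PySem.Dict.empty := by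
    refine PySem.List.foldl_congr_mem _ _ _ _ (fun freq region hm => ?_)
    obtain ⟨gt, hgt⟩ := Option.isSome_iff_exists.mp (h region hm)
    simp [pyStepB, hgt]
  rw [hcongr]
  simp only [pvGts]
  rw [← PySem.Dict.foldl_insert_getD_add_one_eq_counter,
    List.foldl_map (f := fun region => ((PySem.Dict.mk region).get? "gradient_type").getD "")
      (g := fun (d : PySem.Dict String Int) x => d.insert x (d.getD x 0 + 1))]

-- distinct elements (first occurrences) of a list are a permutation of Mathlib's dedup
lemma set_ofList_perm_dedup (l : List String) : (PySem.Set.ofList l : List String).Perm l.dedup := by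
  refine (List.perm_ext_iff_of_nodup ?_ l.nodup_dedup).mpr (fun a => ?_)
  · exact PySem.Set.nodup_ofList l
  · simp [PySem.Set.mem_ofList, List.mem_dedup]

-- summing each distinct key's frequency over the keys satisfying p counts the elements satisfying p
lemma sum_counts (l : List String) (p : String → Bool) :
    ((((PySem.Set.ofList l : List String).filter p).map (fun k => ((List.count k l : Nat) : Int)))).sum
      = (l.countP p : Int) := by
  have hperm := (((set_ofList_perm_dedup l).filter p).map (fun k => ((List.count k l : Nat) : Int))).sum_eq
  rw [hperm]
  have hmm : (l.dedup.filter p).map (fun k => ((List.count k l : Nat) : Int))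
      = ((l.dedup.filter p).map (fun k => List.count k l)).map (fun n : Nat => (n : Int)) :=
    (List.map_map ..).symm
  rw [hmm, ← Nat.cast_list_sum, List.sum_map_count_dedup_filter_eq_countP]

-- ===== VERDICT (by name: the statement is the Claim_ definition above) =====
theorem classify_gradient_types_py_spec : Claim_equal_classify_gradient_types_py := by
  intro regions _ hpre
  unfold Spec_classify_gradient_types_py classify_gradient_types_py classify_gradient_types_py_alt
  rw [pyStepA_loop regions hpre 0 0 0 0, pyStepB_counter regions hpre]
  simp only [PySem.Dict.getD_counter, PySem.Dict.items_counter, List.filter_map, List.map_map,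
    Function.comp_def]
  rw [sum_counts (pvGts regions) (fun k => !pvNamed k)]
  simp [PySem.List.count_eq]
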